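-- pv_equiv track=rewrite | github.com/smithmj/EGM-final-project | figures.py | pattern_finder
-- ===== SOURCE A (Python) =====
-- def pattern_finder(ab_list, min_reps = 50):
--     d = {}
--     for l in range(1, 21):
--         if l not in d:
--             d[l] = ab_list[-l:]
--         for rep in range(2, min_reps + 1):
--             seq = ab_list[-l*rep:-l*(rep-1)]
--             if seq != d[l]:
--                 d[l] = []
--                 break
--     pattern_lens = [l for l in d if d[l] != []]
--     if pattern_lens == []:
--         return ["None"]
--     pattern_len = min(pattern_lens)
--     return d[pattern_len]
-- ===== SOURCE B (Python) =====
-- def pattern_finder(ab_list, min_reps=50):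
--     for l in range(1, 21):
--         block = ab_list[-l:]
--         if not block:
--             continue
--         reps = max(min_reps, 1)
--         if len(ab_list) >= l * reps and ab_list[-l * reps:] == block * reps:
--             return block
--     return ["None"]
-- ===== Notes on version B (the rewrite author's own statement) =====
-- stated objective: simpler
-- what changed: B replaces A's dict over all 20 candidate lengths, per-repetition slice-comparison inner loop and final filter-then-min lookup by a single early-returning scan that tests each candidate tail once with one constructed-repetition suffix equality (ab_list[-l*reps:] == block*reps) guarded by a length check.
import Mathlib
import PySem

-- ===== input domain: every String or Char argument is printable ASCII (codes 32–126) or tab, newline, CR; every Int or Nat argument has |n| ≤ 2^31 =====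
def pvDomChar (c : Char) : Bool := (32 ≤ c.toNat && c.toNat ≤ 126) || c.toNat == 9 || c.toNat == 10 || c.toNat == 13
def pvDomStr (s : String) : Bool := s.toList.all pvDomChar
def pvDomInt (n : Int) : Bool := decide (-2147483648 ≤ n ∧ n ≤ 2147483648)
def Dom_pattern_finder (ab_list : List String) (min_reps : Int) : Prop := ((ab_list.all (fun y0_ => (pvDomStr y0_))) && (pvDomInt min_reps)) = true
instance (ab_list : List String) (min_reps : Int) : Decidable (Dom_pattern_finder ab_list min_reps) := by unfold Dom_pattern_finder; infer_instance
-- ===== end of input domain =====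

-- B replaces A's per-repetition slice-comparison loop and dict-build-then-min by a single
-- constructed-repetition suffix equality with an early return (objective: simpler).

-- ===== PORT A =====
-- inner 'for rep in range(2, min_reps + 1): … break' ; dl is the current d[l], the
-- result is the final d[l] ([] when the loop broke)
def pfRepLoop (ab_list : List String) (min_reps l rep : Int) (dl : List String) : List String :=
  if rep ≤ min_reps then
    let seq := PySem.List.slice ab_list (some (-(l * rep))) (some (-(l * (rep - 1))))
    if seq ≠ dl then []
    else pfRepLoop ab_list min_reps l (rep + 1) dl
  else dl
termination_by (min_reps + 1 - rep).toNat
decreasing_by omega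

def pattern_finder (ab_list : List String) (min_reps : Int) : List String :=
  let d := (PySem.List.pyRange 1 21 1).foldl
    (fun d l =>
      let d1 := if d.contains l then d else d.insert l (PySem.List.slice ab_list (some (-l)) none)
      d1.insert l (pfRepLoop ab_list min_reps l 2 (d1.getD l [])))
    PySem.Dict.empty
  let pattern_lens := d.keys.filter (fun l => decide (d.getD l [] ≠ []))
  if pattern_lens = [] then ["None"]
  else d.getD ((PySem.List.min? pattern_lens (fun x => x)).getD 0) []

-- ===== PORT B =====
-- 'for l in range(1, 21): … return block' with continue / early return
def pfAltLoop (ab_list : List String) (min_reps l : Int) : List String :=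
  if l < 21 then
    let block := PySem.List.slice ab_list (some (-l)) none
    if block = [] then pfAltLoop ab_list min_reps (l + 1)
    else
      let reps := max min_reps 1
      if PySem.List.len ab_list ≥ l * reps ∧
         PySem.List.slice ab_list (some (-(l * reps))) none = (List.replicate reps.toNat block).flatten
      then block
      else pfAltLoop ab_list min_reps (l + 1)
  else ["None"]
termination_by (21 - l).toNat
decreasing_by all_goals omega

def pattern_finder_alt (ab_list : List String) (min_reps : Int) : List String :=
  pfAltLoop ab_list min_reps 1

-- ===== PRECONDITION & SPEC =====
def Spec_pattern_finder (ab_list : List String) (min_reps : Int) (out : List String) : Prop := out = pattern_finder_alt ab_list min_reps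
instance (ab_list : List String) (min_reps : Int) (out : List String) : Decidable (Spec_pattern_finder ab_list min_reps out) := by unfold Spec_pattern_finder; infer_instance

-- ===== CLAIM (what is proved, stated in full; the proofs are below) =====
def Claim_equal_pattern_finder : Prop := ∀ (ab_list : List String) (min_reps : Int), Dom_pattern_finder ab_list min_reps → Spec_pattern_finder ab_list min_reps (pattern_finder ab_list min_reps)

-- ===== LEMMAS AND PROOFS =====

-- the value A leaves in d[l]
def Av (ab : List String) (m l : Int) : List String :=
  pfRepLoop ab m l 2 (PySem.List.slice ab (some (-l)) none)

-- 'first l in ks with Av l ≠ [], returning it' — the common shape of both programs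
def pfGo (ab : List String) (m : Int) (ks : List Int) : List String :=
  match ks with
  | [] => ["None"]
  | l :: t => if Av ab m l ≠ [] then Av ab m l else pfGo ab m t


-- helpers

theorem sliceNN {α : Type} (xs : List α) (k j : Nat) (hk : 0 < k) (hj : 0 < j) :
    PySem.List.slice xs (some (-(k : Int))) (some (-(j : Int))) =
      (xs.drop (xs.length - k)).take ((xs.length - j) - (xs.length - k)) := by
  simp [PySem.List.slice, PySem.List.clampIdx_neg_natCast _ _ hk, PySem.List.clampIdx_neg_natCast _ _ hj]

theorem slice_nil {α : Type} (a b : Option Int) : PySem.List.slice ([] : List α) a b = [] := by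
  simp [PySem.List.slice]

theorem loop_empty (m l : Int) : ∀ (k : Nat) (rep : Int), (m + 1 - rep).toNat = k →
    pfRepLoop [] m l rep [] = [] := by
  intro k
  induction k using Nat.strong_induction_on with
  | _ k IH =>
    intro rep hk
    rw [pfRepLoop]
    by_cases h : rep ≤ m
    · simp only [if_pos h, slice_nil]
      simp only [ne_eq, not_true_eq_false, ite_false]
      exact IH (m + 1 - (rep + 1)).toNat (by omega) (rep + 1) rfl
    · simp [h]

theorem dropRep {α : Type} (l : List α) : ∀ (j M : Nat), j ≤ M →
    List.drop (l.length * j) (List.replicate M l).flatten = (List.replicate (M - j) l).flatten := by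
  intro j
  induction j with
  | zero => intro M _; simp
  | succ j IH =>
    intro M hj
    obtain ⟨M, rfl⟩ : ∃ M', M = M' + 1 := ⟨M - 1, by omega⟩
    · rw [List.replicate_succ, List.flatten_cons]
      have : l.length * (j + 1) = l.length + l.length * j := by ring
      rw [this, ← List.drop_drop, List.drop_left]
      rw [IH M (by omega), Nat.succ_sub_succ]

theorem takeRep {α : Type} (l : List α) (M : Nat) (hM : 1 ≤ M) :
    List.take l.length (List.replicate M l).flatten = l := by
  match M, hM with
  | M + 1, _ => rw [List.replicate_succ, List.flatten_cons, List.take_left]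

theorem repLoop_inv (ab : List String) (m : Int) (L : Nat) (hL : 0 < L) (hm : 2 ≤ m)
    (hLn : L ≤ ab.length) :
    ∀ (k : Nat) (R : Nat), (m + 1 - (R : Int)).toNat = k → 2 ≤ R → (R : Int) ≤ m + 1 →
    L * (R - 1) ≤ ab.length →
    ab.drop (ab.length - L * (R - 1)) = (List.replicate (R - 1) (ab.drop (ab.length - L))).flatten →
    pfRepLoop ab m (L : Int) (R : Int) (ab.drop (ab.length - L)) =
      (if L * m.toNat ≤ ab.length ∧
          ab.drop (ab.length - L * m.toNat) = (List.replicate m.toNat (ab.drop (ab.length - L))).flatten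
       then ab.drop (ab.length - L) else []) := by
  intro k
  induction k using Nat.strong_induction_on with
  | _ k IH =>
    intro R hk hR2 hRm1 hInv1 hInv2
    have hblen : (ab.drop (ab.length - L)).length = L := by
      simp [List.length_drop]; omega
    have haux : L * R = L * (R - 1) + L := by
      obtain ⟨R', rfl⟩ : ∃ R', R = R' + 1 := ⟨R - 1, by omega⟩
      simp [Nat.mul_succ]
    rw [pfRepLoop]
    by_cases hRle : (R : Int) ≤ m
    · have hRM : R ≤ m.toNat := by omega
      simp only [if_pos hRle]
      have e1 : (-(↑L * (R : Int))) = (-((L * R : Nat) : Int)) := by push_cast; ring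
      have e2 : (-(↑L * ((R : Int) - 1))) = (-((L * (R - 1) : Nat) : Int)) := by
        have h1 : ((R : Int) - 1) = ((R - 1 : Nat) : Int) := by omega
        rw [h1]; push_cast; ring
      rw [e1, e2, sliceNN ab (L * R) (L * (R - 1)) (by positivity) (by
        have h2 : 0 < R - 1 := by omega
        positivity)]
      by_cases hn2 : L * R ≤ ab.length
      · have hcount : (ab.length - L * (R - 1)) - (ab.length - L * R) = L := by omega
        rw [hcount]
        by_cases hseq : List.take L (List.drop (ab.length - L * R) ab) = ab.drop (ab.length - L)
        · rw [hseq, if_neg (by simp)]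
          have hcast : ((R : Int) + 1) = ((R + 1 : Nat) : Int) := by push_cast; ring
          rw [hcast]
          apply IH (m + 1 - ((R + 1 : Nat) : Int)).toNat (by omega) (R + 1) rfl (by omega) (by omega)
          · simpa using hn2
          · -- invariant at R + 1
            have hsplit : ab.drop (ab.length - L * R) =
                List.take L (ab.drop (ab.length - L * R)) ++ ab.drop (ab.length - L * (R - 1)) := by
              conv_lhs => rw [← List.take_append_drop L (ab.drop (ab.length - L * R))]
              congr 1
              rw [List.drop_drop]
              congr 1
              omega
            rw [Nat.add_sub_cancel, hsplit, hseq, hInv2]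
            rw [show R = (R - 1) + 1 from by omega]
            rw [List.replicate_succ, List.flatten_cons]
            simp
        · rw [if_pos hseq, if_neg]
          rintro ⟨hM1, hM2⟩
          apply hseq
          have hRM' : L * R ≤ L * m.toNat := Nat.mul_le_mul_left L hRM
          have haux2 : L * m.toNat = L * R + L * (m.toNat - R) := by
            rw [← Nat.mul_add]; congr 1; omega
          have h1 : ab.drop (ab.length - L * R) = (List.replicate R (ab.drop (ab.length - L))).flatten := by
            have hdd : ab.drop (ab.length - L * R) =
                List.drop (L * (m.toNat - R)) (ab.drop (ab.length - L * m.toNat)) := by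
              rw [List.drop_drop]; congr 1; omega
            have hdr := dropRep (ab.drop (ab.length - L)) (m.toNat - R) m.toNat (by omega)
            rw [hblen] at hdr
            rw [hdd, hM2, hdr, show m.toNat - (m.toNat - R) = R from by omega]
          have htr := takeRep (ab.drop (ab.length - L)) R (by omega)
          rw [hblen] at htr
          rw [h1, htr]
      · -- ab.length < L * R : truncated slice, lengths differ
        have hseq : List.take ((ab.length - L * (R - 1)) - (ab.length - L * R))
            (List.drop (ab.length - L * R) ab) ≠ ab.drop (ab.length - L) := by
          intro hcontra
          have hlen := congrArg List.length hcontra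
          simp [List.length_take, List.length_drop, hblen] at hlen
          omega
        rw [if_pos hseq, if_neg]
        rintro ⟨hM1, _⟩
        have h3 : L * R ≤ L * m.toNat := Nat.mul_le_mul_left L (by omega)
        omega
    · -- R = m + 1 : loop finished without a break
      have hRM : R - 1 = m.toNat := by omega
      rw [if_neg hRle, if_pos]
      refine ⟨?_, ?_⟩ <;> rw [← hRM]
      · exact hInv1
      · exact hInv2


theorem Av_eq (ab : List String) (m : Int) (L : Nat) (hL : 0 < L) (hm : 2 ≤ m) :
    Av ab m (L : Int) =
      (if ab ≠ [] ∧ L * m.toNat ≤ ab.length ∧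
          ab.drop (ab.length - L * m.toNat) = (List.replicate m.toNat (ab.drop (ab.length - L))).flatten
       then ab.drop (ab.length - L) else []) := by
  unfold Av
  rw [PySem.List.slice_from_neg_natCast ab L hL]
  by_cases hab : ab = []
  · subst hab
    simp only [List.drop_nil]
    rw [loop_empty m (L : Int) (m + 1 - 2).toNat 2 rfl]
    simp
  · by_cases hLn : L ≤ ab.length
    · have h2 : (((2 : Nat) : Int)) = (2 : Int) := by norm_num
      have key := repLoop_inv ab m L hL hm hLn (m + 1 - ((2 : Nat) : Int)).toNat 2 rfl
        (le_refl 2) (by omega) (by simpa using hLn)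
        (by simp)
      rw [h2] at key
      rw [key]
      simp only [ne_eq, hab, not_false_eq_true, true_and]
    · -- 0 < ab.length < L : the rep = 2 slice is truncated to [], immediate break
      have hn : ab.length < L := by omega
      have hd0 : ab.length - L = 0 := by omega
      rw [pfRepLoop, if_pos (by omega : (2 : Int) ≤ m)]
      have e1 : (-((L : Int) * 2)) = (-((L * 2 : Nat) : Int)) := by push_cast; ring
      have e2 : (-((L : Int) * (2 - 1))) = (-((L : Nat) : Int)) := by push_cast; ring
      rw [e1, e2, sliceNN ab (L * 2) L (by omega) hL]
      rw [hd0, List.drop_zero]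
      have hc : ab.length - L * 2 = 0 := by omega
      rw [show (0 : Nat) - (ab.length - L * 2) = 0 from by omega]
      rw [List.take_zero, if_pos (by exact fun h => hab h.symm), if_neg]
      rintro ⟨_, hM1, _⟩
      have : L * 1 ≤ L * m.toNat := Nat.mul_le_mul_left L (by omega)
      omega

theorem pfGo_filter (ab : List String) (m : Int) (ks : List Int) :
    pfGo ab m ks =
      (match ks.filter (fun l => decide (Av ab m l ≠ [])) with
       | [] => ["None"]
       | l :: _ => Av ab m l) := by
  induction ks with
  | nil => rfl
  | cons l t IH =>
    by_cases h : Av ab m l ≠ []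
    · simp [pfGo, h]
    · simp only [ne_eq, not_not] at h
      simp [pfGo, h, IH]

theorem alt_empty (m : Int) : ∀ (k : Nat) (l : Int), (21 - l).toNat = k →
    pfAltLoop [] m l = ["None"] := by
  intro k
  induction k using Nat.strong_induction_on with
  | _ k IH =>
    intro l hk
    rw [pfAltLoop]
    by_cases h : l < 21
    · rw [if_pos h]
      simp only [slice_nil, ite_true]
      exact IH (21 - (l + 1)).toNat (by omega) (l + 1) rfl
    · rw [if_neg h]

theorem Av_empty (m l : Int) : Av [] m l = [] := by
  unfold Av
  rw [slice_nil]
  exact loop_empty m l (m + 1 - 2).toNat 2 rfl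

theorem alt_eq_go_of_two_le (ab : List String) (m : Int) (hm : 2 ≤ m) :
    ∀ (k : Nat) (L : Nat), 21 - L = k → 1 ≤ L →
    pfAltLoop ab m (L : Int) = pfGo ab m (PySem.List.pyRange (L : Int) 21 1) := by
  intro k
  induction k using Nat.strong_induction_on with
  | _ k IH =>
    intro L hk hL1
    have hL0 : 0 < L := hL1
    rw [pfAltLoop]
    by_cases hL21 : (L : Int) < 21
    · rw [if_pos hL21, PySem.List.pyRange_one_cons hL21]
      have hcast : ((L : Int) + 1) = ((L + 1 : Nat) : Int) := by push_cast; ring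
      have hIH : pfAltLoop ab m ((L : Int) + 1) = pfGo ab m (PySem.List.pyRange ((L : Int) + 1) 21 1) := by
        rw [hcast]
        exact IH (21 - (L + 1)) (by omega) (L + 1) rfl (by omega)
      rw [PySem.List.slice_from_neg_natCast ab L hL0]
      by_cases hab : ab = []
      · subst hab
        simp only [List.drop_nil, ite_true]
        rw [hIH]
        simp [pfGo, Av_empty]
      · have hbne : ab.drop (ab.length - L) ≠ [] := by
          intro hcon
          have := congrArg List.length hcon
          simp [List.length_drop] at this
          have hpos : 0 < ab.length := List.length_pos_of_ne_nil hab
          omega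
        rw [if_neg hbne]
        have hmax : max m 1 = m := max_eq_left (by omega)
        have hmM : (m : Int) = ((m.toNat : Nat) : Int) := by omega
        have e3 : ((L : Int) * m) = ((L * m.toNat : Nat) : Int) := by
          rw [show ((L * m.toNat : Nat) : Int) = (L : Int) * ((m.toNat : Nat) : Int) from by push_cast; ring,
            Int.toNat_of_nonneg (by omega : (0 : Int) ≤ m)]
        simp only [hmax]
        rw [e3, PySem.List.slice_from_neg_natCast ab (L * m.toNat)
          (Nat.mul_pos hL0 (by omega))]
        by_cases hC : L * m.toNat ≤ ab.length ∧
            ab.drop (ab.length - L * m.toNat) = (List.replicate m.toNat (ab.drop (ab.length - L))).flatten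
        · have hg : (PySem.List.len ab ≥ ((L * m.toNat : Nat) : Int)) := by
            rw [PySem.List.len_eq]; exact_mod_cast hC.1
          rw [if_pos (And.intro hg hC.2)]
          simp only [pfGo]
          have hcond := And.intro hab hC
          rw [Av_eq ab m L hL0 hm, if_pos hcond]
          simp [hbne]
        · rw [if_neg (by
            rintro ⟨hg1, hg2⟩
            apply hC
            rw [PySem.List.len_eq] at hg1
            exact ⟨by exact_mod_cast hg1, hg2⟩)]
          rw [hIH]
          have hAv : Av ab m (L : Int) = [] := by
            rw [Av_eq ab m L hL0 hm, if_neg (by rintro ⟨_, hc⟩; exact hC hc)]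
          simp [pfGo, hAv]
    · rw [if_neg hL21, PySem.List.pyRange_one_eq_nil (by omega)]
      rfl

theorem foldA (ab : List String) (m : Int) :
    ∀ (ks : List Int) (d : PySem.Dict Int (List String)), ks.Nodup →
    (∀ x ∈ ks, d.contains x = false) →
    (ks.foldl (fun d l =>
      let d1 := if d.contains l then d else d.insert l (PySem.List.slice ab (some (-l)) none)
      d1.insert l (pfRepLoop ab m l 2 (d1.getD l []))) d).items
      = d.items ++ ks.map (fun l => (l, Av ab m l)) := by
  intro ks
  induction ks with
  | nil => intro d _ _; simp
  | cons l t IH =>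
    intro d hnd hfresh
    have hfl : d.contains l = false := hfresh l (List.mem_cons_self)
    have hstep : (let d1 := if d.contains l then d
                    else d.insert l (PySem.List.slice ab (some (-l)) none)
                  d1.insert l (pfRepLoop ab m l 2 (d1.getD l []))) = d.insert l (Av ab m l) := by
      simp only [hfl, Bool.false_eq_true, ite_false]
      rw [PySem.Dict.getD_insert_self, PySem.Dict.insert_insert_self]
      rfl
    rw [List.foldl_cons, hstep, IH (d.insert l (Av ab m l)) (List.Nodup.of_cons hnd)
      (by
        intro x hx
        rw [PySem.Dict.contains_insert]
        have hxl : x ≠ l := by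
          rintro rfl
          exact (List.nodup_cons.mp hnd).1 hx
        simp [hxl, hfresh x (List.mem_cons_of_mem l hx)]),
      PySem.Dict.items_insert_of_not_contains d _ hfl]
    simp

theorem A_final (ab : List String) (m : Int) (D : PySem.Dict Int (List String))
    (hit : D.items = (PySem.List.pyRange 1 21 1).map (fun l => (l, Av ab m l))) :
    (if D.keys.filter (fun l => decide (D.getD l [] ≠ [])) = [] then ["None"]
     else D.getD ((PySem.List.min? (D.keys.filter (fun l => decide (D.getD l [] ≠ []))) (fun x => x)).getD 0) [])
      = pfGo ab m (PySem.List.pyRange 1 21 1) := by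
  have hkeys : D.keys = PySem.List.pyRange 1 21 1 := by
    simp [PySem.Dict.keys, hit, List.map_map, Function.comp_def]
  have hnd : D.keys.Nodup := by rw [hkeys]; exact PySem.List.nodup_pyRange_one 1 21
  have hgetD : ∀ l ∈ PySem.List.pyRange 1 21 1, D.getD l [] = Av ab m l := by
    intro l hl
    exact PySem.Dict.getD_of_mem_items D (by rw [hit]; exact List.mem_map_of_mem hl) hnd []
  have hfc : D.keys.filter (fun l => decide (D.getD l [] ≠ [])) =
      (PySem.List.pyRange 1 21 1).filter (fun l => decide (Av ab m l ≠ [])) := by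
    rw [hkeys]
    exact List.filter_congr (fun x hx => by rw [hgetD x hx])
  rw [hfc, pfGo_filter]
  cases h : (PySem.List.pyRange 1 21 1).filter (fun l => decide (Av ab m l ≠ [])) with
  | nil => simp
  | cons l0 t =>
    rw [if_neg (by simp)]
    have hpw : ((PySem.List.pyRange 1 21 1).filter (fun l => decide (Av ab m l ≠ []))).Pairwise (· < ·) :=
      (PySem.List.pairwise_lt_pyRange_one 1 21).filter _
    rw [h] at hpw
    have hlt : ∀ x ∈ t, l0 < x := (List.pairwise_cons.mp hpw).1
    rcases o : PySem.List.min? (l0 :: t) (fun x => x) with _ | v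
    · exact absurd ((PySem.List.min?_eq_none_iff _ _).mp o) (by simp)
    · have hvmem := PySem.List.min?_mem o
      have hvmin := PySem.List.min?_isMin o l0 (List.mem_cons_self)
      have hv : v = l0 := by
        rcases List.mem_cons.mp hvmem with h1 | h2
        · exact h1
        · exact absurd hvmin (by simpa using hlt v h2)
      rw [hv]
      simp only [Option.getD_some]
      have hl0 : l0 ∈ PySem.List.pyRange 1 21 1 := by
        refine List.mem_of_mem_filter (p := fun l => decide (Av ab m l ≠ [])) ?_
        rw [h]
        exact List.mem_cons_self
      exact hgetD l0 hl0

set_option maxHeartbeats 1000000 in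
theorem pattern_finder_eq_go (ab : List String) (m : Int) :
    pattern_finder ab m = pfGo ab m (PySem.List.pyRange 1 21 1) := by
  unfold pattern_finder
  refine A_final ab m _ ?_
  rw [foldA ab m (PySem.List.pyRange 1 21 1) PySem.Dict.empty
    (PySem.List.nodup_pyRange_one 1 21) (fun x _ => PySem.Dict.contains_empty x)]
  simp
  rfl

theorem pfGo_none (ab : List String) (m : Int) :
    ∀ ks : List Int, (∀ l ∈ ks, Av ab m l = []) → pfGo ab m ks = ["None"] := by
  intro ks h
  induction ks with
  | nil => rfl
  | cons l t IH =>
    simp [pfGo, h l List.mem_cons_self]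
    exact IH (fun x hx => h x (List.mem_cons_of_mem l hx))

theorem alt_eq_go (ab : List String) (m : Int) :
    pattern_finder_alt ab m = pfGo ab m (PySem.List.pyRange 1 21 1) := by
  unfold pattern_finder_alt
  by_cases hm : 2 ≤ m
  · have h := alt_eq_go_of_two_le ab m hm 20 1 rfl (le_refl 1)
    simpa using h
  · by_cases hab : ab = []
    · subst hab
      rw [alt_empty m ((21 - (1:Int)).toNat) 1 rfl, pfGo_none [] m _ (fun l _ => Av_empty m l)]
    · have hpos : 0 < ab.length := List.length_pos_of_ne_nil hab
      have hbne : ab.drop (ab.length - 1) ≠ [] := by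
        intro hcon
        have := congrArg List.length hcon
        simp [List.length_drop] at this
        omega
      rw [pfAltLoop, if_pos (by norm_num), PySem.List.slice_from_neg_one ab, if_neg hbne]
      have hmax : max m 1 = 1 := max_eq_right (by omega)
      simp only [hmax, mul_one]
      rw [if_pos ⟨by rw [PySem.List.len_eq]; exact_mod_cast hpos, by
        rw [PySem.List.slice_from_neg_one ab]
        simp⟩]
      rw [PySem.List.pyRange_one_cons (by norm_num)]
      have hAv : Av ab m 1 = ab.drop (ab.length - 1) := by
        unfold Av
        rw [pfRepLoop, if_neg (by omega), PySem.List.slice_from_neg_one ab]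
      simp [pfGo, hAv, hbne]

-- ===== VERDICT (by name: the statement is the Claim_ definition above) =====
theorem pattern_finder_spec : Claim_equal_pattern_finder := by
  intro ab m _
  unfold Spec_pattern_finder
  rw [pattern_finder_eq_go, alt_eq_go]
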